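-- pv_equiv track=rewrite | github.com/subhan/Euler | solutions.py | generate_fibseries
-- ===== SOURCE A (Python) =====
-- def fib(number, cache=None):
--     """
--     >>> fib(1)
--     1
--     >>> fib(5)
--     8
--     """
--     cache = cache or {}
--     if number <= 1:
--         return number
--     elif  number in cache:
--         return cache[number]
--     else:
--         cache[number] = fib(number-1, cache) + fib(number-2, cache)
--         return cache[number]
--
-- def generate_fibseries(number):
--     i, seq = 1, []
--     cache = {}
--     while True:
--         val = fib(i, cache)
--         if val < number:
--             seq.append(val)
--             i += 1
--         else:
--             break
--     return seq
-- ===== SOURCE B (Python) =====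
-- def generate_fibseries(number):
--     a, b, seq = 1, 1, []
--     while a < number:
--         seq.append(a)
--         a, b = b, a + b
--     return seq
-- ===== Notes on version B (the rewrite author's own statement) =====
-- stated objective: faster
-- what changed: Replaces the recursive fib helper (whose 'cache = cache or {}' rebinding discards the memo dict on every call, making each fib(i) a naive exponential double recursion) and its while-True/fib(i) driver with a single rolling-pair loop that appends a and steps (a,b)->(b,a+b).
import Mathlib
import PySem

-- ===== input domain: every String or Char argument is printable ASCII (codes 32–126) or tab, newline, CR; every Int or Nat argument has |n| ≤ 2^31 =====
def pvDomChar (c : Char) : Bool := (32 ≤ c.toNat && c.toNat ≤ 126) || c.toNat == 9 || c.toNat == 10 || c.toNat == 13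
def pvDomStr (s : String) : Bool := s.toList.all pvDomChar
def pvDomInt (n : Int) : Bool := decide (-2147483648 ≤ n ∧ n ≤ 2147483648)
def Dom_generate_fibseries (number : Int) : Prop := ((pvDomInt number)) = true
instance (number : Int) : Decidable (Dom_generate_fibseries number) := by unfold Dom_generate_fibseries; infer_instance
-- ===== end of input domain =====

-- B replaces A's memoized-in-name-only recursive fib helper with one rolling-pair loop (faster).

-- ===== PORT A =====
-- fib(number, cache): returns (value, caller-visible cache afterwards).  Python's
-- 'cache = cache or {}' rebinds to a FRESH dict when the incoming dict is empty, so
-- mutations are visible to the caller only when the incoming dict was nonempty; the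
-- 'if cache.items.isEmpty' at the end models exactly that aliasing.
def fibA (number : Int) (cache : PySem.Dict Int Int) : Int × PySem.Dict Int Int :=
  if _h : number ≤ 1 then (number, cache)
  else
    match cache.get? number with
    | some v => (v, cache)
    | none =>
      let r1 := fibA (number - 1) cache
      let r2 := fibA (number - 2) r1.2
      let c3 := r2.2.insert number (r1.1 + r2.1)
      (r1.1 + r2.1, if cache.items.isEmpty then cache else c3)
termination_by number.toNat
decreasing_by all_goals omega

-- the 'while True' loop of generate_fibseries; fuel is only a totality guard
-- (fib grows, so number.toNat + 2 iterations always reach the break).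
def loopA (fuel : Nat) (i : Int) (seq : List Int) (cache : PySem.Dict Int Int) (number : Int) : List Int :=
  match fuel with
  | 0 => seq
  | fuel + 1 =>
    let r := fibA i cache
    if r.1 < number then loopA fuel (i + 1) (seq ++ [r.1]) r.2 number else seq

def generate_fibseries (number : Int) : List Int :=
  loopA (number.toNat + 2) 1 [] PySem.Dict.empty number

-- ===== PORT B =====
def loopB (fuel : Nat) (a b : Int) (seq : List Int) (number : Int) : List Int :=
  match fuel with
  | 0 => seq
  | fuel + 1 =>
    if a < number then loopB fuel b (a + b) (seq ++ [a]) number else seq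

def generate_fibseries_alt (number : Int) : List Int :=
  loopB (number.toNat + 2) 1 1 [] number

-- ===== PRECONDITION & SPEC =====
def Spec_generate_fibseries (number : Int) (out : List Int) : Prop := out = generate_fibseries_alt number
instance (number : Int) (out : List Int) : Decidable (Spec_generate_fibseries number out) := by unfold Spec_generate_fibseries; infer_instance

-- ===== CLAIM (what is proved, stated in full; the proofs are below) =====
def Claim_equal_generate_fibseries : Prop := ∀ (number : Int), Dom_generate_fibseries number → Spec_generate_fibseries number (generate_fibseries number)

-- ===== LEMMAS AND PROOFS =====

-- the mathematical Fibonacci recursion A computes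
def F (n : Int) : Int :=
  if n ≤ 1 then n else F (n - 1) + F (n - 2)
termination_by n.toNat
decreasing_by all_goals omega

lemma fibA_empty (n : Int) : fibA n PySem.Dict.empty = (F n, PySem.Dict.empty) := by
  induction n using F.induct with
  | case1 n h => rw [fibA, F]; simp [h]
  | case2 n h ih1 ih2 =>
    rw [fibA, dif_neg h]
    have hg : (PySem.Dict.empty : PySem.Dict Int Int).get? n = none := rfl
    simp only [hg]
    rw [ih1, ih2]
    conv_rhs => rw [F, if_neg h]
    rfl

lemma F_step (n : Int) (h : 0 ≤ n) : F (n + 2) = F n + F (n + 1) := by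
  rw [F]
  have h2 : ¬ n + 2 ≤ 1 := by omega
  simp only [h2, if_false]
  have e1 : n + 2 - 1 = n + 1 := by ring
  have e2 : n + 2 - 2 = n := by ring
  rw [e1, e2, Int.add_comm]

lemma loopA_eq_loopB (fuel : Nat) (i : Int) (hi : 1 ≤ i) (seq : List Int) (number : Int) :
    loopA fuel i seq PySem.Dict.empty number = loopB fuel (F i) (F (i + 1)) seq number := by
  induction fuel generalizing i seq with
  | zero => rfl
  | succ fuel ih =>
    rw [loopA, loopB]
    simp only [fibA_empty]
    by_cases hlt : F i < number
    · simp only [hlt, if_true]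
      rw [ih (i + 1) (by omega)]
      have : F i + F (i + 1) = F (i + 1 + 1) := by
        have := F_step i (by omega)
        have e : i + 1 + 1 = i + 2 := by ring
        rw [e]; omega
      rw [this]
    · simp [hlt]

-- ===== VERDICT (by name: the statement is the Claim_ definition above) =====
theorem generate_fibseries_spec : Claim_equal_generate_fibseries := by
  intro number _
  unfold Spec_generate_fibseries generate_fibseries generate_fibseries_alt
  rw [loopA_eq_loopB _ 1 (by omega)]
  have h0 : F 0 = 0 := by rw [F]; norm_num
  have h1 : F 1 = 1 := by rw [F]; norm_num
  have h2 : F 2 = 1 := by rw [F]; norm_num [h0, h1]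
  rw [show (1:Int) + 1 = 2 from rfl, h1, h2]
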